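-- pv_equiv track=rewrite | github.com/MendozaLab/erdos-experiments | Erdos30/singer_dispersion.py | prime_power_base
-- ===== SOURCE A (Python) =====
-- def is_prime(n):
--     if n < 2: return False
--     if n < 4: return True
--     if n % 2 == 0 or n % 3 == 0: return False
--     i = 5
--     while i * i <= n:
--         if n % i == 0 or n % (i + 2) == 0: return False
--         i += 6
--     return True
--
-- def prime_power_base(q):
--     """Return (p, k) s.t. q = p^k (prime p), or None."""
--     if q < 2: return None
--     for p in range(2, q + 1):
--         if not is_prime(p): continue
--         k, pk = 0, 1
--         while pk <= q:
--             pk *= p; k += 1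
--         pk //= p; k -= 1
--         if pk == q:
--             return (p, k)
--     return None
-- ===== SOURCE B (Python) =====
-- def prime_power_base(q):
--     """Return (p, k) s.t. q = p^k (prime p), or None."""
--     if q < 2:
--         return None
--     # smallest prime factor of q by trial division up to sqrt(q)
--     p = q
--     d = 2
--     while d * d <= q:
--         if q % d == 0:
--             p = d
--             break
--         d += 1
--     # divide out p; q is a prime power iff nothing else remains
--     k = 0
--     m = q
--     while m % p == 0:
--         m //= p
--         k += 1
--     return (p, k) if m == 1 else None
-- ===== Notes on version B (the rewrite author's own statement) =====
-- stated objective: faster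
-- what changed: Instead of scanning every integer in [2,q], primality-testing each, and rebuilding powers per candidate, B finds the smallest prime factor p by one trial-division pass up to sqrt(q) and then just divides q by p until it cannot, checking the residue is 1.
import Mathlib
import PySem

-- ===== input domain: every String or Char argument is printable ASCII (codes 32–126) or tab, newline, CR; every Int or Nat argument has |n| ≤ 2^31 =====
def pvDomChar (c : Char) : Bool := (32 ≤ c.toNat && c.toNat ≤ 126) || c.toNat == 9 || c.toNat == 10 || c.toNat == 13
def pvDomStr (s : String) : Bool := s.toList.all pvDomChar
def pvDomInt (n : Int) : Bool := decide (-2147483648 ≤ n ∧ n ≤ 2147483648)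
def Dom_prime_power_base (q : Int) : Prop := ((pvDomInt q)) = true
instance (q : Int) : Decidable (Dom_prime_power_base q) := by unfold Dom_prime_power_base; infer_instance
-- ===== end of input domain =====

-- B replaces A's scan over all of [2,q] (primality-testing each candidate and rebuilding its powers)
-- by one trial division up to sqrt(q) for the smallest prime factor p, then divides q by p to the end.

-- ===== PORT A =====
-- while i*i <= n: check n % i, n % (i+2); i += 6   (fuel bounds the iterations; n.toNat+1 always suffices)
def ipLoop (n i : Int) (fuel : Nat) : Bool :=
  match fuel with
  | 0 => true
  | fuel+1 =>
    if i * i ≤ n then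
      if (PySem.Int.mod n i == 0) || (PySem.Int.mod n (i + 2) == 0) then false
      else ipLoop n (i + 6) fuel
    else true

def is_prime (n : Int) : Bool :=
  if n < 2 then false
  else if n < 4 then true
  else if (PySem.Int.mod n 2 == 0) || (PySem.Int.mod n 3 == 0) then false
  else ipLoop n 5 (n.toNat + 1)

-- k, pk = 0, 1; while pk <= q: pk *= p; k += 1   (fuel q.toNat+2 always suffices for p ≥ 2)
def powLoop (p q k pk : Int) (fuel : Nat) : Int × Int :=
  match fuel with
  | 0 => (k, pk)
  | fuel+1 => if pk ≤ q then powLoop p q (k + 1) (pk * p) fuel else (k, pk)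

def aLoop (q : Int) (ps : List Int) : Option (List Int) :=
  match ps with
  | [] => none
  | p :: rest =>
    if !is_prime p then aLoop q rest
    else
      let kp := powLoop p q 0 1 (q.toNat + 2)
      if PySem.Int.floordiv kp.2 p == q then some [p, kp.1 - 1] else aLoop q rest

def prime_power_base (q : Int) : Option (List Int) :=
  if q < 2 then none else aLoop q (PySem.List.pyRange 2 (q + 1) 1)

-- ===== PORT B =====
-- d = 2; while d*d <= q: if q % d == 0: p = d; break; d += 1   (else p stays q)
def spfLoop (q d : Int) (fuel : Nat) : Int :=
  match fuel with
  | 0 => q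
  | fuel+1 =>
    if d * d ≤ q then
      if PySem.Int.mod q d == 0 then d else spfLoop q (d + 1) fuel
    else q

-- k = 0; m = q; while m % p == 0: m //= p; k += 1
def divLoop (p m k : Int) (fuel : Nat) : Int × Int :=
  match fuel with
  | 0 => (m, k)
  | fuel+1 =>
    if PySem.Int.mod m p == 0 then divLoop p (PySem.Int.floordiv m p) (k + 1) fuel
    else (m, k)

def prime_power_base_alt (q : Int) : Option (List Int) :=
  if q < 2 then none
  else
    let p := spfLoop q 2 (q.toNat + 2)
    let mk := divLoop p q 0 (q.toNat + 2)
    if mk.1 == 1 then some [p, mk.2] else none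

-- ===== PRECONDITION & SPEC =====
def Spec_prime_power_base (q : Int) (out : Option (List Int)) : Prop := out = prime_power_base_alt q
instance (q : Int) (out : Option (List Int)) : Decidable (Spec_prime_power_base q out) := by unfold Spec_prime_power_base; infer_instance

-- ===== CLAIM (what is proved, stated in full; the proofs are below) =====
def Claim_equal_prime_power_base : Prop := ∀ (q : Int), Dom_prime_power_base q → Spec_prime_power_base q (prime_power_base q)

-- ===== LEMMAS AND PROOFS =====

-- if q has no divisor e with e*e ≤ q then q is prime
lemma prime_of_no_sqrt (q : Int) (h2 : 2 ≤ q)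
    (hinv : ∀ e : Int, 2 ≤ e → e * e ≤ q → ¬ e ∣ q) : q.toNat.Prime := by
  rw [Nat.prime_def_le_sqrt]
  refine ⟨by omega, ?_⟩
  intro m hm hms hdvd
  have hmm : m * m ≤ q.toNat := by
    have := Nat.le_sqrt'.mp hms; nlinarith [this]
  have hmmI : (m : Int) * m ≤ q := by
    have : ((m * m : Nat) : Int) ≤ ((q.toNat : Nat) : Int) := by exact_mod_cast hmm
    push_cast at this; omega
  refine hinv m (by exact_mod_cast hm) hmmI ?_
  have : ((m : Nat) : Int) ∣ ((q.toNat : Nat) : Int) := Int.natCast_dvd_natCast.mpr hdvd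
  rwa [Int.toNat_of_nonneg (by omega : (0:Int) ≤ q)] at this

-- if q has no divisor in [2,d) and q < d*d then q is prime
lemma prime_of_no_small (q d : Int) (h2 : 2 ≤ q) (hd0 : 0 < d)
    (hinv : ∀ e : Int, 2 ≤ e → e < d → ¬ e ∣ q) (hd : q < d * d) :
    q.toNat.Prime := by
  refine prime_of_no_sqrt q h2 ?_
  intro e he hee
  exact hinv e he (by nlinarith)

-- ipLoop returns true when n is prime (completeness of the 6k±1 scan)
lemma ipLoop_complete (fuel : Nat) (n i : Int) (h5 : 5 ≤ i) (hn : 2 ≤ n)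
    (hp : Nat.Prime n.toNat) : ipLoop n i fuel = true := by
  induction fuel generalizing i with
  | zero => rfl
  | succ fuel ih =>
    rw [ipLoop]
    by_cases hii : i * i ≤ n
    · have hnd : ∀ e : Int, 2 ≤ e → e < n → ¬ e ∣ n := by
        intro e he hen hdvd
        have heN : e.toNat ∣ n.toNat := by
          rw [← Int.natCast_dvd_natCast, Int.toNat_of_nonneg (by omega),
            Int.toNat_of_nonneg (by omega)]
          exact hdvd
        rcases hp.eq_one_or_self_of_dvd _ heN with h | h <;> omega
      have h1 : ¬ i ∣ n := hnd i (by omega) (by nlinarith)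
      have h2 : ¬ (i + 2) ∣ n := hnd (i + 2) (by omega) (by nlinarith)
      rw [if_pos hii, if_neg ?_, ih (i + 6) (by omega)]
      simp only [Bool.or_eq_true, beq_iff_eq, PySem.Int.mod_eq_zero_iff_dvd]
      tauto
    · rw [if_neg hii]

-- if ipLoop returns true then n has no divisor e with e*e ≤ n (soundness)
lemma ipLoop_sound (fuel : Nat) (n i : Int) (t : Nat) (hi : i = 6 * t + 5)
    (hn : 5 ≤ n) (h2 : ¬ (2:Int) ∣ n) (h3 : ¬ (3:Int) ∣ n)
    (hinv : ∀ e : Int, 2 ≤ e → e < i → ¬ e ∣ n)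
    (hfuel : n.toNat < i.toNat * i.toNat + fuel)
    (hres : ipLoop n i fuel = true) :
    ∀ e : Int, 2 ≤ e → e * e ≤ n → ¬ e ∣ n := by
  induction fuel generalizing i t with
  | zero =>
    intro e he hee
    have hiN : i = ((i.toNat : Nat) : Int) := by omega
    have hnN : n = ((n.toNat : Nat) : Int) := by omega
    have hni : n < i * i := by
      rw [hiN, hnN]; exact_mod_cast (by omega : n.toNat < i.toNat * i.toNat)
    exact hinv e he (by nlinarith)
  | succ fuel ih =>
    rw [ipLoop] at hres
    by_cases hii : i * i ≤ n
    · rw [if_pos hii] at hres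
      by_cases hc : ((PySem.Int.mod n i == 0) || (PySem.Int.mod n (i + 2) == 0)) = true
      · rw [if_pos hc] at hres; exact absurd hres (by simp)
      · rw [if_neg hc] at hres
        simp only [Bool.or_eq_true, beq_iff_eq, PySem.Int.mod_eq_zero_iff_dvd] at hc
        push Not at hc
        refine ih (i + 6) (t + 1) (by omega) ?_ ?_ hres
        · intro e he he6
          by_cases hel : e < i
          · exact hinv e he hel
          · push Not at hel
            -- i ≤ e < i + 6, i = 6t+5
            have : e = i ∨ e = i + 1 ∨ e = i + 2 ∨ e = i + 3 ∨ e = i + 4 ∨ e = i + 5 := by omega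
            rcases this with h | h | h | h | h | h
            · rw [h]; exact hc.1
            · intro hd
              exact h2 (dvd_trans ⟨3 * (t : Int) + 3, by rw [h, hi]; ring⟩ hd)
            · rw [h]; exact hc.2
            · intro hd
              exact h2 (dvd_trans ⟨3 * (t : Int) + 4, by rw [h, hi]; ring⟩ hd)
            · intro hd
              exact h3 (dvd_trans ⟨2 * (t : Int) + 3, by rw [h, hi]; ring⟩ hd)
            · intro hd
              exact h2 (dvd_trans ⟨3 * (t : Int) + 5, by rw [h, hi]; ring⟩ hd)
        · have h6 : (i + 6).toNat = i.toNat + 6 := by omega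
          rw [h6]
          have : i.toNat * i.toNat + 1 ≤ (i.toNat + 6) * (i.toNat + 6) := by nlinarith
          omega
    · rw [if_neg hii] at hres
      push Not at hii
      intro e he hee
      exact hinv e he (by nlinarith)

lemma is_prime_sound (c : Int) (h : is_prime c = true) : 2 ≤ c ∧ Nat.Prime c.toNat := by
  unfold is_prime at h
  split_ifs at h with hlt h4 hdc
  · refine ⟨by omega, ?_⟩
    have : c = 2 ∨ c = 3 := by omega
    rcases this with h | h <;> subst h <;> decide
  · simp only [Bool.or_eq_true, beq_iff_eq, PySem.Int.mod_eq_zero_iff_dvd] at hdc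
    push Not at hdc
    obtain ⟨h2, h3⟩ := hdc
    have h5 : 5 ≤ c := by
      rcases (by omega : c = 4 ∨ 5 ≤ c) with h | h
      · exact absurd (h ▸ (by decide : (2:Int) ∣ 4)) h2
      · exact h
    have hinv5 : ∀ e : Int, 2 ≤ e → e < 5 → ¬ e ∣ c := by
      intro e he he5
      have : e = 2 ∨ e = 3 ∨ e = 4 := by omega
      rcases this with h | h | h
      · rw [h]; exact h2
      · rw [h]; exact h3
      · rw [h]; intro hd; exact h2 (dvd_trans (by decide) hd)
    have hall := ipLoop_sound (c.toNat + 1) c 5 0 (by norm_num) h5 h2 h3 hinv5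
      (by norm_num; omega) h
    exact ⟨by omega, prime_of_no_sqrt c (by omega) hall⟩

lemma is_prime_complete (c : Int) (h2 : 2 ≤ c) (hp : Nat.Prime c.toNat) : is_prime c = true := by
  unfold is_prime
  rw [if_neg (by omega)]
  by_cases h4 : c < 4
  · rw [if_pos h4]
  · rw [if_neg h4, if_neg ?_]
    · exact ipLoop_complete _ c 5 (by norm_num) (by omega) hp
    · simp only [Bool.or_eq_true, beq_iff_eq, PySem.Int.mod_eq_zero_iff_dvd]
      push Not
      constructor <;> intro hd
      · have : (2:Int).toNat ∣ c.toNat := by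
          rw [← Int.natCast_dvd_natCast, Int.toNat_of_nonneg (by omega),
            Int.toNat_of_nonneg (by omega)]; exact hd
        rcases hp.eq_one_or_self_of_dvd _ this with h | h <;> omega
      · have : (3:Int).toNat ∣ c.toNat := by
          rw [← Int.natCast_dvd_natCast, Int.toNat_of_nonneg (by omega),
            Int.toNat_of_nonneg (by omega)]; exact hd
        rcases hp.eq_one_or_self_of_dvd _ this with h | h <;> omega

lemma powLoop_spec (fuel : Nat) : ∀ (p q k pk : Int), 2 ≤ p → 1 ≤ pk →
    q.toNat + 2 ≤ pk.toNat + fuel →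
    ∃ j : Nat, powLoop p q k pk fuel = (k + j, pk * p ^ j) ∧ q < pk * p ^ j ∧
      ∀ i : Nat, i < j → pk * p ^ i ≤ q := by
  induction fuel with
  | zero =>
    intro p q k pk hp hpk hfuel
    refine ⟨0, by simp [powLoop], by simpa using (by omega : q < pk), by omega⟩
  | succ fuel ih =>
    intro p q k pk hp hpk hfuel
    by_cases h : pk ≤ q
    · have hpk' : (1:Int) ≤ pk * p := by nlinarith
      have hstep : pk + 1 ≤ pk * p := by nlinarith
      obtain ⟨j, hj, hlt, hle⟩ := ih p q (k + 1) (pk * p) hp hpk' (by omega)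
      have hmul : ∀ i : Nat, pk * p * p ^ i = pk * p ^ (i + 1) := by
        intro i; rw [pow_succ]; ring
      refine ⟨j + 1, ?_, ?_, ?_⟩
      · rw [powLoop, if_pos h, hj, ← hmul j]
        refine congrArg₂ Prod.mk (by push_cast; ring) rfl
      · rw [← hmul j]; exact hlt
      · intro i hi
        match i with
        | 0 => simpa using h
        | i + 1 => rw [← hmul i]; exact hle i (by omega)
    · refine ⟨0, ?_, by simpa using (by omega : q < pk), by omega⟩
      rw [powLoop, if_neg h]; simp

lemma spfLoop_spec (fuel : Nat) : ∀ (q d : Int), 2 ≤ d → 2 ≤ q →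
    (∀ e : Int, 2 ≤ e → e < d → ¬ e ∣ q) →
    q.toNat + 2 ≤ d.toNat + fuel →
    spfLoop q d fuel = (q.toNat.minFac : Int) := by
  induction fuel with
  | zero =>
    intro q d hd h2 hinv hfuel
    have hdd : q < d * d := by nlinarith [(by omega : q + 2 ≤ d)]
    have := (prime_of_no_small q d h2 (by omega) hinv hdd).minFac_eq
    rw [spfLoop, this, Int.toNat_of_nonneg (by omega)]
  | succ fuel ih =>
    intro q d hd h2 hinv hfuel
    by_cases hdd : d * d ≤ q
    · by_cases hdvd : d ∣ q
      · have hm0 : PySem.Int.mod q d = 0 := (PySem.Int.mod_eq_zero_iff_dvd q d).mpr hdvd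
        rw [spfLoop, if_pos hdd, if_pos (by simp [hm0])]
        have hq : q = ((q.toNat : Nat) : Int) := by omega
        have hdN : d = ((d.toNat : Nat) : Int) := by omega
        have hdvdN : d.toNat ∣ q.toNat := by
          rw [← Int.natCast_dvd_natCast, ← hq, ← hdN]; exact hdvd
        have hle : q.toNat.minFac ≤ d.toNat := Nat.minFac_le_of_dvd (by omega) hdvdN
        have hpm := Nat.minFac_prime (by omega : q.toNat ≠ 1)
        have h2m : 2 ≤ q.toNat.minFac := hpm.two_le
        have hdvdm : (q.toNat.minFac : Int) ∣ q := by
          rw [hq]; exact Int.natCast_dvd_natCast.mpr (Nat.minFac_dvd _)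
        by_contra hne
        have hlt : (q.toNat.minFac : Int) < d := by omega
        exact hinv _ (by exact_mod_cast h2m) hlt hdvdm
      · rw [spfLoop, if_pos hdd,
          if_neg (by simp [PySem.Int.mod_eq_zero_iff_dvd]; exact hdvd)]
        refine ih q (d + 1) (by omega) h2 ?_ (by omega)
        intro e he hed
        rcases lt_or_eq_of_le (by omega : e ≤ d) with h | h
        · exact hinv e he h
        · subst h; exact hdvd
    · push Not at hdd
      have := (prime_of_no_small q d h2 (by omega) hinv hdd).minFac_eq
      rw [spfLoop, if_neg (by omega), this, Int.toNat_of_nonneg (by omega)]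

lemma divLoop_spec (fuel : Nat) : ∀ (p m k : Int), 2 ≤ p → 1 ≤ m → m.toNat ≤ fuel →
    ∃ (j : Nat) (m' : Int), divLoop p m k fuel = (m', k + j) ∧ m = m' * p ^ j ∧
      ¬ p ∣ m' ∧ 1 ≤ m' := by
  induction fuel with
  | zero => intro p m k hp hm hf; omega
  | succ fuel ih =>
    intro p m k hp hm hf
    by_cases hdvd : p ∣ m
    · have hm0 : PySem.Int.mod m p = 0 := (PySem.Int.mod_eq_zero_iff_dvd m p).mpr hdvd
      obtain ⟨t, ht⟩ := hdvd
      have hfl : PySem.Int.floordiv m p = t := by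
        rw [PySem.Int.floordiv_eq_ediv_of_pos (by omega), ht,
          Int.mul_ediv_cancel_left _ (by omega)]
      have ht1 : (1:Int) ≤ t := by nlinarith
      have htm : t < m := by nlinarith
      obtain ⟨j, m', heq, hfact, hnd, hm'⟩ := ih p t (k + 1) hp ht1 (by omega)
      refine ⟨j + 1, m', ?_, ?_, hnd, hm'⟩
      · rw [divLoop]; simp only [hm0, hfl]
        rw [if_pos (by simp), heq]
        refine congrArg₂ Prod.mk rfl (by push_cast; ring)
      · rw [ht, hfact, pow_succ]; ring
    · have hm0 : PySem.Int.mod m p ≠ 0 := fun h => hdvd ((PySem.Int.mod_eq_zero_iff_dvd m p).mp h)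
      refine ⟨0, m, ?_, by simp, hdvd, hm⟩
      rw [divLoop, if_neg (by simpa using hm0)]; simp

-- a candidate c is skipped if is_prime rejects it or q is not a positive power of c
lemma toNat_dvd_toNat {a b : Int} (ha : 0 ≤ a) (hb : 0 ≤ b) : a.toNat ∣ b.toNat ↔ a ∣ b := by
  rw [← Int.natCast_dvd_natCast, Int.toNat_of_nonneg ha, Int.toNat_of_nonneg hb]

lemma aLoop_skip (q c : Int) (rest : List Int) (h2 : 2 ≤ q) (hc : 2 ≤ c)
    (hmiss : is_prime c = false ∨ ¬ ∃ e : Nat, 1 ≤ e ∧ q = c ^ e) :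
    aLoop q (c :: rest) = aLoop q rest := by
  rcases hmiss with hp | hmiss
  · simp [aLoop, hp]
  · by_cases hp : is_prime c
    · obtain ⟨j, hj, hlt, hle⟩ := powLoop_spec (q.toNat + 2) c q 0 1 hc (by omega) (by omega)
      have hj1 : 1 ≤ j := by
        rcases Nat.eq_zero_or_pos j with h | h
        · exfalso; subst h; simp at hlt; omega
        · exact h
      have hcj : c ^ j = c * c ^ (j - 1) := by
        conv_lhs => rw [show j = (j - 1) + 1 by omega]
        rw [pow_succ]; ring
      have hfl : PySem.Int.floordiv (powLoop c q 0 1 (q.toNat + 2)).2 c = c ^ (j - 1) := by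
        rw [hj]
        show PySem.Int.floordiv (1 * c ^ j) c = c ^ (j - 1)
        rw [one_mul, PySem.Int.floordiv_eq_ediv_of_pos (by omega), hcj,
          Int.mul_ediv_cancel_left _ (by omega)]
      have hne : (PySem.Int.floordiv (powLoop c q 0 1 (q.toNat + 2)).2 c == q) = false := by
        rw [hfl, beq_eq_false_iff_ne]
        intro heq
        refine hmiss ⟨j - 1, ?_, heq.symm⟩
        by_contra h0
        have hj0 : j - 1 = 0 := by omega
        rw [hj0, pow_zero] at heq
        omega
      simp [aLoop, hp, hne]
    · simp [aLoop, hp]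

lemma aLoop_hit (q p : Int) (K : Nat) (rest : List Int) (_h2 : 2 ≤ q)
    (hp : is_prime p = true) (hq : q = p ^ K) :
    aLoop q (p :: rest) = some [p, (K : Int)] := by
  have hp2 : 2 ≤ p := (is_prime_sound p hp).1
  obtain ⟨j, hj, hlt, hle⟩ := powLoop_spec (q.toNat + 2) p q 0 1 hp2 (by omega) (by omega)
  have hp1 : (1:Int) < p := by omega
  simp only [one_mul] at hlt
  have hKj : K < j := by
    by_contra h
    push Not at h
    have := (pow_le_pow_iff_right₀ hp1).mpr h
    omega
  have hjeq : j = K + 1 := by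
    by_contra h
    have h1 : K + 1 < j := by omega
    have := hle (K + 1) h1
    have h3 : p ^ K < p ^ (K + 1) := (pow_lt_pow_iff_right₀ hp1).mpr (by omega)
    simp only [one_mul] at this
    omega
  have hfl : PySem.Int.floordiv (powLoop p q 0 1 (q.toNat + 2)).2 p = q := by
    rw [hj]
    show PySem.Int.floordiv (1 * p ^ j) p = q
    rw [one_mul, hjeq, pow_succ, PySem.Int.floordiv_eq_ediv_of_pos (by omega),
      Int.mul_ediv_cancel _ (by omega), hq]
  have heq : (PySem.Int.floordiv (powLoop p q 0 1 (q.toNat + 2)).2 p == q) = true := by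
    rw [hfl, beq_iff_eq]
  simp only [aLoop, hp, Bool.not_true, Bool.false_eq_true, if_false, heq, if_true]
  have : (powLoop p q 0 1 (q.toNat + 2)).1 = (j : Int) := by rw [hj]; simp
  rw [this, hjeq]
  push_cast
  norm_num

lemma aLoop_skip_all (q : Int) (l rest : List Int) (h2 : 2 ≤ q)
    (h : ∀ c ∈ l, 2 ≤ c ∧ (is_prime c = false ∨ ¬ ∃ e : Nat, 1 ≤ e ∧ q = c ^ e)) :
    aLoop q (l ++ rest) = aLoop q rest := by
  induction l with
  | nil => rfl
  | cons c l ih =>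
    rw [List.cons_append,
      aLoop_skip q c _ h2 (h c List.mem_cons_self).1 (h c List.mem_cons_self).2]
    exact ih fun d hd => h d (List.mem_cons_of_mem c hd)

theorem main_eq (q : Int) : prime_power_base q = prime_power_base_alt q := by
  by_cases hq2 : q < 2
  · rw [prime_power_base, prime_power_base_alt, if_pos hq2, if_pos hq2]
  · push Not at hq2
    have hq0 : (0:Int) ≤ q := by omega
    have hqN : ((q.toNat : Nat) : Int) = q := Int.toNat_of_nonneg hq0
    have hn1 : q.toNat ≠ 1 := by omega
    have hPprime : q.toNat.minFac.Prime := Nat.minFac_prime hn1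
    set P : Int := ((q.toNat.minFac : Nat) : Int) with hPdef
    have hPtoNat : P.toNat = q.toNat.minFac := Int.toNat_natCast _
    have hP2 : 2 ≤ P := by rw [hPdef]; exact_mod_cast hPprime.two_le
    have hPq : P ≤ q := by
      have := Nat.minFac_le (by omega : 0 < q.toNat)
      omega
    have hspf : spfLoop q 2 (q.toNat + 2) = P :=
      spfLoop_spec (q.toNat + 2) q 2 le_rfl hq2 (fun e he hed => by omega) (by omega)
    obtain ⟨j, m', hdiv, hfact, hnd, hm'⟩ :=
      divLoop_spec (q.toNat + 2) P q 0 hP2 (by omega) (by omega)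
    have hmq : m' ∣ q := ⟨P ^ j, by rw [hfact]⟩
    rw [prime_power_base, prime_power_base_alt, if_neg (by omega), if_neg (by omega)]
    simp only [hspf, hdiv]
    by_cases hm1 : m' = 1
    · -- q = P ^ j : A scans to P and returns (P, j)
      subst hm1
      rw [one_mul] at hfact
      have hj1 : 1 ≤ j := by
        by_contra h0
        have : j = 0 := by omega
        rw [this, pow_zero] at hfact
        omega
      have hprime : is_prime P = true := by
        refine is_prime_complete P hP2 ?_
        rw [hPtoNat]; exact hPprime
      rw [PySem.List.pyRange_one_append 2 P (q + 1) hP2 (by omega),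
        aLoop_skip_all q _ _ hq2 ?_,
        PySem.List.pyRange_one_cons (by omega : P < q + 1),
        aLoop_hit q P j _ hq2 hprime hfact]
      · rw [if_pos (by simp), zero_add]
      · intro c hc
        rw [PySem.List.mem_pyRange_one] at hc
        refine ⟨hc.1, Or.inr ?_⟩
        rintro ⟨e, he1, hqe⟩
        have hcd : c ∣ q := by
          refine Dvd.intro (c ^ (e - 1)) ?_
          rw [hqe]
          conv_rhs => rw [show e = (e - 1) + 1 by omega]
          rw [pow_succ]; ring
        have : q.toNat.minFac ≤ c.toNat :=
          Nat.minFac_le_of_dvd (by omega) ((toNat_dvd_toNat (by omega) hq0).mpr hcd)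
        omega
    · -- q is not a prime power : both sides return none
      rw [if_neg (by simpa using hm1)]
      rw [← List.append_nil (PySem.List.pyRange 2 (q + 1) 1), aLoop_skip_all q _ _ hq2 ?_]
      · rfl
      · intro c hc
        rw [PySem.List.mem_pyRange_one] at hc
        refine ⟨hc.1, ?_⟩
        by_cases hpc : is_prime c
        · refine Or.inr ?_
          rintro ⟨e, he1, hqe⟩
          have hcP : c.toNat.Prime := (is_prime_sound c hpc).2
          have hc2 : 2 ≤ c := hc.1
          -- q.toNat = c.toNat ^ e
          have hqe' : q.toNat = c.toNat ^ e := by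
            have : q = ((c.toNat ^ e : Nat) : Int) := by
              push_cast [Int.toNat_of_nonneg (by omega : (0:Int) ≤ c)]
              exact hqe
            rw [this, Int.toNat_natCast]
          -- minFac q.toNat = c.toNat
          have hPc : q.toNat.minFac = c.toNat := by
            have hd0 : q.toNat.minFac ∣ c.toNat ^ e := by
              rw [← hqe']; exact Nat.minFac_dvd _
            have hd : q.toNat.minFac ∣ c.toNat := hPprime.dvd_of_dvd_pow hd0
            rcases hcP.eq_one_or_self_of_dvd _ hd with h | h
            · exact absurd h (by have := hPprime.two_le; omega)
            · exact h
          -- m' divides c ^ e and is coprime to c, so m' = 1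
          have hmN : m'.toNat ∣ c.toNat ^ e := by
            rw [← hqe']
            exact (toNat_dvd_toNat (by omega) hq0).mpr hmq
          obtain ⟨t, ht, hmt⟩ := (Nat.dvd_prime_pow hcP).mp hmN
          have ht0 : t = 0 := by
            by_contra h0
            refine hnd ?_
            have : c.toNat ∣ m'.toNat := by
              rw [hmt]
              exact dvd_pow_self _ h0
            rw [← hPc] at this
            have := (toNat_dvd_toNat (by omega : (0:Int) ≤ P) (by omega : (0:Int) ≤ m')).mp
              (by rwa [hPtoNat])
            exact this
          rw [ht0, pow_zero] at hmt
          exact hm1 (by omega)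
        · exact Or.inl (by simpa using hpc)

-- ===== VERDICT (by name: the statement is the Claim_ definition above) =====
theorem prime_power_base_spec : Claim_equal_prime_power_base := by
  intro q _
  exact main_eq q
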